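-- pv_equiv track=rewrite | github.com/TreesClouds/PiE2021 | fullcode.py | reverse_lower
-- ===== SOURCE A (Python) =====
-- def reverse_lower(string):
--     lis = list(string)
--     lower_indexes, lower_characters, index = [], [], 0
--     for char in lis:
--         if char.islower():
--             lower_characters.append(char)
--             lower_indexes.append(index)
--         index += 1
--     lower_characters.reverse()
--     index = 0
--     for char in lower_characters:
--         lis[lower_indexes[index]] = char
--         index += 1
--     return "".join(lis)
-- ===== SOURCE B (Python) =====
-- def reverse_lower(string):
--     lis = list(string)
--     i, j = 0, len(lis) - 1
--     while i < j:
--         if not lis[i].islower():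
--             i += 1
--         elif not lis[j].islower():
--             j -= 1
--         else:
--             lis[i], lis[j] = lis[j], lis[i]
--             i += 1
--             j -= 1
--     return "".join(lis)
-- ===== Notes on version B (the rewrite author's own statement) =====
-- stated objective: alternative
-- what changed: Replaces A's gather-indexes/gather-chars/reverse/scatter three-phase structure with the classic two-pointer in-place algorithm: pointers walk in from both ends and swap the outermost pair of lowercase characters.
import Mathlib
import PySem

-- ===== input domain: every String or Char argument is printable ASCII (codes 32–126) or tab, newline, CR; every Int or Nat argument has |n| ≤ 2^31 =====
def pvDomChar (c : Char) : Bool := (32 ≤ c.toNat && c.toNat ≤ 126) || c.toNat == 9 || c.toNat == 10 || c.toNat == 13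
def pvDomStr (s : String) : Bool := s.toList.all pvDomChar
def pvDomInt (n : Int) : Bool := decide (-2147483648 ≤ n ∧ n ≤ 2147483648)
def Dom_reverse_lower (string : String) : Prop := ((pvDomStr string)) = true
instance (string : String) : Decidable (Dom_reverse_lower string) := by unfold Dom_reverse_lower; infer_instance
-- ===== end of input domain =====

-- B replaces A's gather/reverse/scatter three-phase structure with the classic
-- two-pointer in-place swap of the outermost lowercase pair (objective: alternative).

-- ===== PORT A =====
def reverse_lower (string : String) : String :=
  let lis := string.toList
  let st := lis.foldl (fun (acc : List Nat × List Char × Nat) char =>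
      if PySem.Chars.islower char then (acc.1 ++ [acc.2.2], acc.2.1 ++ [char], acc.2.2 + 1)
      else (acc.1, acc.2.1, acc.2.2 + 1)) ([], [], 0)
  -- lower_indexes[index] is always in range (both lists were built together), so pyGetD's default 0 is never used
  let fin := st.2.1.reverse.foldl (fun (acc : List Char × Nat) char =>
      (PySem.List.pySetD acc.1 ((PySem.List.pyGetD st.1 (acc.2 : Int) 0 : Nat) : Int) char, acc.2 + 1))
      (lis, 0)
  String.ofList fin.1

-- ===== PORT B =====
-- the while loop of Source B; i, j as Nat: Python's j = -1 (empty string) never enters the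
-- loop, exactly like Nat's 0 - 1 = 0 here, and inside the loop 0 ≤ i < j so the indices
-- coincide with Python's; in-range lis[i] is exact as pyGetD/pySetD.
def pvLoop (lis : List Char) (i j : Nat) : List Char :=
  if _h : i < j then
    if PySem.Chars.islower (PySem.List.pyGetD lis (i : Int) ' ') = false then
      pvLoop lis (i + 1) j
    else if PySem.Chars.islower (PySem.List.pyGetD lis (j : Int) ' ') = false then
      pvLoop lis i (j - 1)
    else
      pvLoop
        (PySem.List.pySetD (PySem.List.pySetD lis (i : Int) (PySem.List.pyGetD lis (j : Int) ' '))
          (j : Int) (PySem.List.pyGetD lis (i : Int) ' '))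
        (i + 1) (j - 1)
  else lis
termination_by j - i
decreasing_by all_goals omega

def reverse_lower_alt (string : String) : String :=
  let lis := string.toList
  String.ofList (pvLoop lis 0 (lis.length - 1))

-- ===== PRECONDITION & SPEC =====
def Spec_reverse_lower (string : String) (out : String) : Prop := out = reverse_lower_alt string
instance (string : String) (out : String) : Decidable (Spec_reverse_lower string out) := by unfold Spec_reverse_lower; infer_instance

-- ===== CLAIM (what is proved, stated in full; the proofs are below) =====
def Claim_equal_reverse_lower : Prop := ∀ (string : String), Dom_reverse_lower string → Spec_reverse_lower string (reverse_lower string)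

-- ===== LEMMAS AND PROOFS =====

/-- reference: the stream form — replace each lowercase char by the next element of `src`
    (= the reversed list of lowercase chars); both ports are reduced to this. -/
def pvAltGo : List Char → List Char → List Char
  | [], _ => []
  | c :: t, src =>
    if PySem.Chars.islower c then
      match src with
      | s :: ss => s :: pvAltGo t ss
      | [] => c :: pvAltGo t []
    else c :: pvAltGo t src

/-- recursive form of the two-pointer algorithm, on the segment between the pointers -/
def pvGoR : List Char → List Char
  | [] => []
  | [c] => [c]
  | c :: b :: t =>
    let rest := b :: t
    let d := rest.getLast (by simp)
    let mid := rest.dropLast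
    if PySem.Chars.islower c = false then c :: pvGoR rest
    else if PySem.Chars.islower d = false then pvGoR (c :: mid) ++ [d]
    else d :: pvGoR mid ++ [c]
termination_by s => s.length
decreasing_by all_goals simp [List.length_dropLast]

/-- positions (offset by `n`) of the lowercase characters of `xs` -/
def pvIdxs : List Char → Nat → List Nat
  | [], _ => []
  | c :: t, n => if PySem.Chars.islower c then n :: pvIdxs t (n + 1) else pvIdxs t (n + 1)

/-- write the given (position, char) pairs into the list -/
def pvScatter : List Char → List (Nat × Char) → List Char
  | lis, [] => lis
  | lis, (i, y) :: rest => pvScatter (lis.set i y) rest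

theorem pvIdxs_length (xs : List Char) (n : Nat) :
    (pvIdxs xs n).length = (xs.filter PySem.Chars.islower).length := by
  induction xs generalizing n with
  | nil => rfl
  | cons c t ih =>
    simp only [pvIdxs, List.filter_cons]
    by_cases h : PySem.Chars.islower c <;> simp [h, ih]

theorem pvFold1 (xs : List Char) (I : List Nat) (C : List Char) (n : Nat) :
    xs.foldl (fun (acc : List Nat × List Char × Nat) char =>
      if PySem.Chars.islower char then (acc.1 ++ [acc.2.2], acc.2.1 ++ [char], acc.2.2 + 1)
      else (acc.1, acc.2.1, acc.2.2 + 1)) (I, C, n)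
    = (I ++ pvIdxs xs n, C ++ xs.filter PySem.Chars.islower, n + xs.length) := by
  induction xs generalizing I C n with
  | nil => simp [pvIdxs]
  | cons c t ih =>
    simp only [List.foldl_cons, List.filter_cons, pvIdxs]
    by_cases h : PySem.Chars.islower c <;>
      simp [h, ih] <;> omega

theorem pvFold2 (I : List Nat) (ys : List Char) (lis : List Char) (j : Nat)
    (hle : j + ys.length ≤ I.length) :
    (ys.foldl (fun (acc : List Char × Nat) char =>
      (PySem.List.pySetD acc.1 ((PySem.List.pyGetD I (acc.2 : Int) 0 : Nat) : Int) char, acc.2 + 1))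
      (lis, j)).1
    = pvScatter lis ((I.drop j).zip ys) := by
  induction ys generalizing lis j with
  | nil => simp [pvScatter]
  | cons y ys' ih =>
    have hj : j < I.length := by simp at hle; omega
    rw [List.drop_eq_getElem_cons hj]
    simp only [List.foldl_cons, List.zip_cons_cons, pvScatter]
    rw [PySem.List.pyGetD_natCast, PySem.List.pySetD_natCast]
    have : I.getD j 0 = I[j] := by simp [List.getD, hj]
    rw [this]
    exact ih _ (j + 1) (by simp at hle ⊢; omega)

theorem pvMain (xs pre ys : List Char)
    (hlen : ys.length = (xs.filter PySem.Chars.islower).length) :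
    pvScatter (pre ++ xs) ((pvIdxs xs pre.length).zip ys) = pre ++ pvAltGo xs ys := by
  induction xs generalizing pre ys with
  | nil =>
    cases ys with
    | nil => simp [pvIdxs, pvScatter, pvAltGo]
    | cons y t => simp [List.filter] at hlen
  | cons c t ih =>
    by_cases h : PySem.Chars.islower c
    · cases ys with
      | nil => simp [h] at hlen
      | cons y ys' =>
        simp only [pvIdxs, h, if_pos, List.zip_cons_cons, pvScatter, pvAltGo]
        have hset : (pre ++ c :: t).set pre.length y = (pre ++ [y]) ++ t := by
          rw [List.set_append_right _ _ (le_refl _)]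
          simp
        rw [hset]
        have := ih (pre ++ [y]) ys'
          (by simpa [List.filter_cons, h] using hlen)
        simp only [List.length_append, List.length_singleton] at this
        rw [this]
        simp
    · simp only [pvIdxs, h, if_neg, Bool.false_eq_true, not_false_iff, pvAltGo]
      have hmid : pre ++ c :: t = (pre ++ [c]) ++ t := by simp
      rw [hmid]
      have := ih (pre ++ [c]) ys (by simpa [List.filter_cons, h] using hlen)
      simp only [List.length_append, List.length_singleton] at this
      rw [this]
      simp

/-- appending a non-lowercase char at the end commutes with the stream pass -/
theorem pvAlt_snoc_nonlower (s : List Char) (d : Char)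
    (hd : PySem.Chars.islower d = false) (src : List Char) :
    pvAltGo (s ++ [d]) src = pvAltGo s src ++ [d] := by
  induction s generalizing src with
  | nil => simp [pvAltGo, hd]
  | cons c t ih =>
    simp only [List.cons_append, pvAltGo]
    by_cases h : PySem.Chars.islower c
    · simp only [h, if_pos]
      cases src <;> simp [ih]
    · simp [h, ih]

/-- with the stream exactly as long as the lowercase count, appending a lowercase char
    to the segment and anything to the stream commutes with the stream pass -/
theorem pvAlt_snoc_lower (s : List Char) (d e : Char)
    (hd : PySem.Chars.islower d = true) :
    ∀ src : List Char, src.length = (s.filter PySem.Chars.islower).length →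
      pvAltGo (s ++ [d]) (src ++ [e]) = pvAltGo s src ++ [e] := by
  induction s with
  | nil =>
    intro src hsrc
    have : src = [] := List.length_eq_zero_iff.mp (by simpa using hsrc)
    subst this
    simp [pvAltGo, hd]
  | cons c t ih =>
    intro src hsrc
    simp only [List.cons_append, pvAltGo]
    by_cases h : PySem.Chars.islower c
    · simp only [h, if_pos]
      cases src with
      | nil => simp [List.filter_cons, h] at hsrc
      | cons y ys =>
        simp only [List.cons_append]
        rw [ih ys (by simpa [List.filter_cons, h] using hsrc)]
    · simp only [h, if_neg, Bool.false_eq_true, not_false_iff]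
      rw [ih src (by simpa [List.filter_cons, h] using hsrc)]
      simp

/-- `getD` at the seam of an append -/
theorem pv_getD_at (pre suf : List Char) (x dflt : Char) :
    (pre ++ x :: suf).getD pre.length dflt = x := by
  induction pre with
  | nil => rfl
  | cons a l ih => simpa using ih

/-- `set` at the seam of an append -/
theorem pv_set_at (pre suf : List Char) (x y : Char) :
    (pre ++ x :: suf).set pre.length y = pre ++ y :: suf := by
  induction pre with
  | nil => rfl
  | cons a l ih => simpa using ih

theorem pvGoR_eq : (s : List Char) →
    pvGoR s = pvAltGo s (s.reverse.filter PySem.Chars.islower)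
  | [] => by simp [pvGoR, pvAltGo]
  | [c] => by
    by_cases h : PySem.Chars.islower c <;> simp [pvGoR, pvAltGo, h]
  | c :: b :: t => by
    have hrest : (b :: t) ≠ [] := by simp
    set d := (b :: t).getLast hrest with hd
    set mid := (b :: t).dropLast with hmid
    have hsplit : b :: t = mid ++ [d] := (List.dropLast_append_getLast hrest).symm
    have hmlen : mid.length = t.length := by
      have := congrArg List.length hsplit; simp at this; omega
    cases hc : PySem.Chars.islower c with
    | true =>
      cases hdl : PySem.Chars.islower d with
      | true =>
        -- swap case
        have hstep : pvGoR (c :: b :: t) = d :: pvGoR mid ++ [c] := by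
          rw [pvGoR]; simp [hc, hdl, ← hd, ← hmid]
        rw [hstep, pvGoR_eq mid, hsplit]
        have hrev : ((c :: (mid ++ [d])).reverse.filter PySem.Chars.islower)
            = d :: (mid.reverse.filter PySem.Chars.islower ++ [c]) := by
          simp [List.filter_append, List.filter_cons, hdl, hc]
        rw [hrev]
        have hhead : pvAltGo (c :: (mid ++ [d]))
              (d :: (mid.reverse.filter PySem.Chars.islower ++ [c]))
            = d :: pvAltGo (mid ++ [d]) (mid.reverse.filter PySem.Chars.islower ++ [c]) := by
          simp [pvAltGo, hc]
        rw [hhead, pvAlt_snoc_lower mid d c hdl (mid.reverse.filter PySem.Chars.islower)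
            (by simp [List.filter_reverse])]
        simp
      | false =>
        -- last char not lowercase
        have hstep : pvGoR (c :: b :: t) = pvGoR (c :: mid) ++ [d] := by
          rw [pvGoR]; simp [hc, hdl, ← hd, ← hmid]
        rw [hstep, pvGoR_eq (c :: mid), hsplit]
        have hrev : ((c :: (mid ++ [d])).reverse.filter PySem.Chars.islower)
            = (c :: mid).reverse.filter PySem.Chars.islower := by
          simp [List.filter_append, List.filter_cons, hdl, hc]
        rw [hrev]
        have : c :: (mid ++ [d]) = (c :: mid) ++ [d] := by simp
        rw [this, pvAlt_snoc_nonlower _ _ hdl]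
    | false =>
      -- first char not lowercase
      have hstep : pvGoR (c :: b :: t) = c :: pvGoR (b :: t) := by
        rw [pvGoR]; simp [hc]
      rw [hstep, pvGoR_eq (b :: t)]
      have hrev : ((c :: b :: t).reverse.filter PySem.Chars.islower)
          = (b :: t).reverse.filter PySem.Chars.islower := by
        simp [List.filter_append, List.filter_cons, hc]
      rw [hrev]
      simp [pvAltGo, hc]
  termination_by s => s.length
  decreasing_by all_goals (simp only [List.length_cons, List.length_append, List.length_dropLast]; omega)

/-- loop invariant: the two-pointer loop operates exactly on the segment between the
    pointers and computes `pvGoR` on it -/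
theorem pvLoop_seg : (seg : List Char) → (pre suf : List Char) →
    pvLoop (pre ++ seg ++ suf) pre.length (pre.length + seg.length - 1)
      = pre ++ pvGoR seg ++ suf
  | [], pre, suf => by
    rw [pvLoop]
    have h : ¬ (pre.length < pre.length + ([] : List Char).length - 1) := by simp
    simp [h, pvGoR]
  | [c], pre, suf => by
    rw [pvLoop]
    have h : ¬ (pre.length < pre.length + ([c] : List Char).length - 1) := by simp
    simp [h, pvGoR]
  | c :: b :: t, pre, suf => by
    have hrest : (b :: t) ≠ [] := by simp
    set d := (b :: t).getLast hrest with hd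
    set mid := (b :: t).dropLast with hmid
    have hsplit : b :: t = mid ++ [d] := (List.dropLast_append_getLast hrest).symm
    have hmlen : mid.length = t.length := by
      have := congrArg List.length hsplit; simp at this; omega
    have hij : pre.length < pre.length + (c :: b :: t).length - 1 := by simp <;> omega
    have hgi : PySem.List.pyGetD (pre ++ (c :: b :: t) ++ suf) (pre.length : Int) ' ' = c := by
      rw [PySem.List.pyGetD_natCast]
      have e1 : pre ++ (c :: b :: t) ++ suf = pre ++ c :: (b :: t ++ suf) := by simp
      rw [e1, pv_getD_at]
    have hgj : PySem.List.pyGetD (pre ++ (c :: b :: t) ++ suf)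
        ((pre.length + (c :: b :: t).length - 1 : Nat) : Int) ' ' = d := by
      rw [PySem.List.pyGetD_natCast]
      have e1 : pre ++ (c :: b :: t) ++ suf = (pre ++ c :: mid) ++ d :: suf := by
        rw [hsplit]; simp
      have e2 : pre.length + (c :: b :: t).length - 1 = (pre ++ c :: mid).length := by
        simp [hmlen] <;> omega
      rw [e1, e2, pv_getD_at]
    rw [pvLoop]
    simp only [hij, dif_pos, hgi, hgj]
    cases hc : PySem.Chars.islower c with
    | true =>
      cases hdl : PySem.Chars.islower d with
      | true =>
        -- swap
        simp only [hc, hdl, Bool.true_eq_false, if_neg, not_false_iff, if_false]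
        have hset : PySem.List.pySetD
            (PySem.List.pySetD (pre ++ (c :: b :: t) ++ suf) (pre.length : Int) d)
            ((pre.length + (c :: b :: t).length - 1 : Nat) : Int) c
            = (pre ++ [d]) ++ mid ++ ([c] ++ suf) := by
          rw [PySem.List.pySetD_natCast, PySem.List.pySetD_natCast]
          have e1 : pre ++ (c :: b :: t) ++ suf = pre ++ c :: (b :: t ++ suf) := by simp
          rw [e1, pv_set_at]
          have e2 : pre ++ d :: (b :: t ++ suf) = (pre ++ d :: mid) ++ d :: suf := by
            rw [hsplit]; simp
          have e3 : pre.length + (c :: b :: t).length - 1 = (pre ++ d :: mid).length := by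
            simp [hmlen] <;> omega
          rw [e2, e3, pv_set_at]
          simp
        rw [hset]
        have harg1 : pre.length + 1 = (pre ++ [d]).length := by simp
        have harg2 : pre.length + (c :: b :: t).length - 1 - 1
            = (pre ++ [d]).length + mid.length - 1 := by simp [hmlen] <;> omega
        rw [harg1, harg2, pvLoop_seg mid (pre ++ [d]) ([c] ++ suf)]
        have hstep : pvGoR (c :: b :: t) = d :: pvGoR mid ++ [c] := by
          rw [pvGoR]; simp [hc, hdl, ← hd, ← hmid]
        rw [hstep]; simp
      | false =>
        -- move j
        simp only [hc, hdl, Bool.true_eq_false, if_neg, not_false_iff, if_pos]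
        have harg : pre.length + (c :: b :: t).length - 1 - 1
            = pre.length + (c :: mid).length - 1 := by simp [hmlen] <;> omega
        have hlist : pre ++ (c :: b :: t) ++ suf = pre ++ (c :: mid) ++ ([d] ++ suf) := by
          rw [hsplit]; simp
        rw [harg, hlist, pvLoop_seg (c :: mid) pre ([d] ++ suf)]
        have hstep : pvGoR (c :: b :: t) = pvGoR (c :: mid) ++ [d] := by
          rw [pvGoR]; simp [hc, hdl, ← hd, ← hmid]
        rw [hstep]; simp
    | false =>
      -- move i
      simp only [hc, if_pos]
      have harg1 : pre.length + 1 = (pre ++ [c]).length := by simp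
      have harg2 : pre.length + (c :: b :: t).length - 1
          = (pre ++ [c]).length + (b :: t).length - 1 := by simp <;> omega
      have hlist : pre ++ (c :: b :: t) ++ suf = (pre ++ [c]) ++ (b :: t) ++ suf := by simp
      rw [harg1, harg2, hlist, pvLoop_seg (b :: t) (pre ++ [c]) suf]
      have hstep : pvGoR (c :: b :: t) = c :: pvGoR (b :: t) := by
        rw [pvGoR]; simp [hc]
      rw [hstep]; simp
  termination_by seg => seg.length
  decreasing_by all_goals (simp only [List.length_cons, List.length_append, List.length_dropLast]; omega)

-- ===== VERDICT (by name: the statement is the Claim_ definition above) =====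
theorem reverse_lower_spec : Claim_equal_reverse_lower := by
  intro s _
  unfold Spec_reverse_lower reverse_lower reverse_lower_alt
  simp only [pvFold1, List.nil_append]
  rw [pvFold2 _ _ _ 0 (by simp [pvIdxs_length]), List.drop_zero]
  have hA := pvMain s.toList [] ((s.toList.filter PySem.Chars.islower).reverse) (by simp)
  simp only [List.nil_append, List.length_nil] at hA
  rw [hA]
  have hB := pvLoop_seg s.toList [] []
  simp only [List.nil_append, List.append_nil, List.length_nil, Nat.zero_add] at hB
  rw [hB, pvGoR_eq, List.filter_reverse]
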